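-- pv_equiv track=rewrite | github.com/joaoponcesc/ist-2021-fp | fp-tic-tac-toe.py | est_1_diagonal
-- ===== SOURCE A (Python) =====
-- def eh_tabuleiro(x):
--     '''
--
--     :param x: equivale ao tabuleiro
--     :return:  verifica se o tabulerio e valido
--     '''
--     if type(x) != tuple:
--         return False
--     if len(x) != 3:
--         return False
--     for c in x:
--         if type(c) != tuple:
--             return False
--         if len(c) != 3:
--             return False
--         for p in c:
--             if (p != 1 and p != 0 and p != -1) or type(p) != int:
--                 return False
--     return True
--
-- def obter_diagonal(x, y):
--     '''
--
--     :param x: equivale ao tabuleiro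
--     :param y: diagonal a obter
--     :return: diagonal pedida (1 ou 2) em tuplo
--     '''
--     if eh_tabuleiro(x) == False:
--         raise ValueError("obter_diagonal: algum dos argumentos e invalido")
--     if (y != 1 and y != 2) or type(y) != int:
--         raise ValueError("obter_diagonal: algum dos argumentos e invalido")
--     i = 0
--     j = 2
--     diag = ()
--     if y == 1:
--         while i < len(x):
--             diag += (x[i][i],)
--             i += 1
--     if y == 2:
--         while j >= 0 and i < len(x):
--             diag += (x[j][i],)
--             j -= 1
--             i += 1
--     return diag
--
-- def est_1_diagonal(x, y):
--     '''
--     funcao auxiliar as estrategias 1 e 2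
--     verifica se o tabuleiro possui algum dois em linha numa das duas diagonais
--
--     :param x: equivale ao tabuleiro
--     :param y: 1 ou -1 (que equivalem as pecas X e O respetivamente)
--     :return: posicao que levaria a um tres em linha
--     '''
--     a, b, c = 5, 1, 9
--     pos3 = 0
--     j = 1
--     while j < 3:
--         if obter_diagonal(x, j) == (y, y, 0):
--             pos3 = c
--         elif obter_diagonal(x, j) == (0, y, y):
--             pos3 = b
--         elif obter_diagonal(x, j) == (y, 0, y):
--             pos3 = a
--         c -= 6
--         b += 6
--         j += 1
--     return pos3
-- ===== SOURCE B (Python) =====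
-- def eh_tabuleiro(x):
--     if type(x) != tuple:
--         return False
--     if len(x) != 3:
--         return False
--     for c in x:
--         if type(c) != tuple:
--             return False
--         if len(c) != 3:
--             return False
--         for p in c:
--             if (p != 1 and p != 0 and p != -1) or type(p) != int:
--                 return False
--     return True
--
-- def obter_diagonal(x, y):
--     if eh_tabuleiro(x) == False:
--         raise ValueError("obter_diagonal: algum dos argumentos e invalido")
--     if (y != 1 and y != 2) or type(y) != int:
--         raise ValueError("obter_diagonal: algum dos argumentos e invalido")
--     i = 0
--     j = 2
--     diag = ()
--     if y == 1:
--         while i < len(x):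
--             diag += (x[i][i],)
--             i += 1
--     if y == 2:
--         while j >= 0 and i < len(x):
--             diag += (x[j][i],)
--             j -= 1
--             i += 1
--     return diag
--
-- def est_1_diagonal(x, y):
--     pos3 = 0
--     for j, positions in ((1, (1, 5, 9)), (2, (7, 5, 3))):
--         diag = obter_diagonal(x, j)
--         if diag.count(y) == 2 and diag.count(0) == 1:
--             pos3 = positions[diag.index(0)]
--     return pos3
-- ===== Notes on version B (the rewrite author's own statement) =====
-- stated objective: simpler
-- what changed: Replaces the six hand-maintained pattern comparisons (with mutating a/b/c offsets) by one loop over the two diagonals with a fixed board-position table per diagonal, detecting two-in-a-row by count(y)==2 and count(0)==1 and reading the move from the table at the empty cell's index.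
-- outside the precondition, e.g. on est_1_diagonal(((0, 0, 0), (0, 0, 0), (0, 0, 0)), 0): A returns 3, B returns 0
import Mathlib
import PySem

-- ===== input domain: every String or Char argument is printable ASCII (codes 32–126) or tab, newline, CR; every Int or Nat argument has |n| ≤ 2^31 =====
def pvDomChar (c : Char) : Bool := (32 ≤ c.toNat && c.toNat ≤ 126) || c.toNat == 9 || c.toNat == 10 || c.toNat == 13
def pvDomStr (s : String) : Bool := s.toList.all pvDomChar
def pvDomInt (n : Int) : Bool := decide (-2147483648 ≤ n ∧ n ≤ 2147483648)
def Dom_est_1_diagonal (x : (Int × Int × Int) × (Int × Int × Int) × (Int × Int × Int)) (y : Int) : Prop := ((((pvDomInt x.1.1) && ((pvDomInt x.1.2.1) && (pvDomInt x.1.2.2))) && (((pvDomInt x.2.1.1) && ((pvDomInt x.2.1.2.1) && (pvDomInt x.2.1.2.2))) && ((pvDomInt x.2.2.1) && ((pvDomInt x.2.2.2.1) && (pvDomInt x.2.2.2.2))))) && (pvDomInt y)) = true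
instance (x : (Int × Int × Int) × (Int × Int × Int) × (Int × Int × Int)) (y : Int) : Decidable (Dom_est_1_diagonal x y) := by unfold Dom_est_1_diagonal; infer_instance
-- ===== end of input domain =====

-- B replaces A's six pattern comparisons (with mutated offsets a/b/c) by a per-diagonal
-- position table indexed by the empty cell, using count-based two-in-a-row detection (simpler).

-- ===== PORT A =====
-- eh_tabuleiro: the type checks are statically true under the Lean types; the value check remains
def eh_tabuleiro (x : (Int × Int × Int) × (Int × Int × Int) × (Int × Int × Int)) : Bool :=
  let ok : Int → Bool := fun p => p == 1 || p == 0 || p == -1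
  ok x.1.1 && ok x.1.2.1 && ok x.1.2.2 &&
  ok x.2.1.1 && ok x.2.1.2.1 && ok x.2.1.2.2 &&
  ok x.2.2.1 && ok x.2.2.2.1 && ok x.2.2.2.2

-- obter_diagonal: none = ValueError; the two while-loops over the fixed 3 rows are unrolled
def obter_diagonal (x : (Int × Int × Int) × (Int × Int × Int) × (Int × Int × Int)) (y : Int) :
    Option (Int × Int × Int) :=
  if eh_tabuleiro x = false then none
  else if y ≠ 1 ∧ y ≠ 2 then none
  else if y = 1 then some (x.1.1, x.2.1.2.1, x.2.2.2.2)   -- x[0][0], x[1][1], x[2][2]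
  else some (x.2.2.1, x.2.1.2.1, x.1.2.2)                  -- x[2][0], x[1][1], x[0][2]

-- the while loop 'j = 1; while j < 3' with state (b, c, pos3) (a stays 5), as a fold over j = 1, 2;
-- where obter_diagonal raises (none) no branch fires (those inputs lie outside Pre_)
def est_1_diagonal (x : (Int × Int × Int) × (Int × Int × Int) × (Int × Int × Int)) (y : Int) : Int :=
  (([1, 2] : List Int).foldl
    (fun (s : Int × Int × Int) (j : Int) =>
      let pos3 :=
        if obter_diagonal x j = some (y, y, 0) then s.2.1
        else if obter_diagonal x j = some (0, y, y) then s.1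
        else if obter_diagonal x j = some (y, 0, y) then (5 : Int)
        else s.2.2
      (s.1 + 6, s.2.1 - 6, pos3))
    (1, 9, 0)).2.2

-- ===== PORT B =====
def diagCount (d : Int × Int × Int) (v : Int) : Nat :=
  (if d.1 = v then 1 else 0) + (if d.2.1 = v then 1 else 0) + (if d.2.2 = v then 1 else 0)

-- diag.index(0): index of the first 0 (only used when one exists)
def diagIdx0 (d : Int × Int × Int) : Nat :=
  if d.1 = 0 then 0 else if d.2.1 = 0 then 1 else 2

def pickPos (p : Int × Int × Int) (i : Nat) : Int :=
  if i = 0 then p.1 else if i = 1 then p.2.1 else p.2.2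

def est_1_diagonal_alt (x : (Int × Int × Int) × (Int × Int × Int) × (Int × Int × Int)) (y : Int) : Int :=
  ([((1 : Int), ((1 : Int), (5 : Int), (9 : Int))), (2, (7, 5, 3))]).foldl
    (fun (pos3 : Int) jp =>
      match obter_diagonal x jp.1 with
      | none => pos3   -- Python raises here; outside Pre_
      | some d => if diagCount d y = 2 ∧ diagCount d 0 = 1 then pickPos jp.2 (diagIdx0 d) else pos3)
    0

-- ===== PRECONDITION & SPEC =====
-- Pre_ excludes invalid boards, on which A raises ValueError, and y = 0, which lies outside the
-- documented piece values {1, -1}: there the two-in-a-row question is not meaningful and the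
-- implementations defensibly differ on all-empty diagonals.
def Pre_est_1_diagonal (x : (Int × Int × Int) × (Int × Int × Int) × (Int × Int × Int)) (y : Int) : Prop :=
  eh_tabuleiro x = true ∧ y ≠ 0
instance (x : (Int × Int × Int) × (Int × Int × Int) × (Int × Int × Int)) (y : Int) : Decidable (Pre_est_1_diagonal x y) := by unfold Pre_est_1_diagonal; infer_instance

def pvWitness_est_1_diagonal : ((Int × Int × Int) × (Int × Int × Int) × (Int × Int × Int)) × Int :=
  (((1, 1, 0), (0, 0, 0), (0, 0, 0)), 1)

def Spec_est_1_diagonal (x : (Int × Int × Int) × (Int × Int × Int) × (Int × Int × Int)) (y : Int) (out : Int) : Prop := out = est_1_diagonal_alt x y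
instance (x : (Int × Int × Int) × (Int × Int × Int) × (Int × Int × Int)) (y : Int) (out : Int) : Decidable (Spec_est_1_diagonal x y out) := by unfold Spec_est_1_diagonal; infer_instance

-- ===== CLAIM (what is proved, stated in full; the proofs are below) =====
def Claim_equal_est_1_diagonal : Prop := ∀ (x : (Int × Int × Int) × (Int × Int × Int) × (Int × Int × Int)) (y : Int), Dom_est_1_diagonal x y → Pre_est_1_diagonal x y → Spec_est_1_diagonal x y (est_1_diagonal x y)

-- ===== LEMMAS AND PROOFS =====

-- one diagonal step: A's three pattern tests against B's count/index table lookup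
theorem diag_step_eq (y p q1 q2 q3 : Int) (d : Int × Int × Int) (hy : y ≠ 0) :
    (if d = (y, y, 0) then q3
     else if d = (0, y, y) then q1
     else if d = (y, 0, y) then q2
     else p)
    = (if diagCount d y = 2 ∧ diagCount d 0 = 1 then pickPos (q1, q2, q3) (diagIdx0 d) else p) := by
  obtain ⟨d1, d2, d3⟩ := d
  simp only [diagCount, diagIdx0, pickPos, Prod.mk.injEq]
  by_cases h1 : d1 = y <;> by_cases h2 : d2 = y <;> by_cases h3 : d3 = y <;>
    by_cases g1 : d1 = 0 <;> by_cases g2 : d2 = 0 <;> by_cases g3 : d3 = 0 <;>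
    simp_all

theorem est_1_diagonal_spec : Claim_equal_est_1_diagonal := by
  intro x y _ hpre
  obtain ⟨hb, hy⟩ := hpre
  have h1 : obter_diagonal x 1 = some (x.1.1, x.2.1.2.1, x.2.2.2.2) := by
    simp [obter_diagonal, hb]
  have h2 : obter_diagonal x 2 = some (x.2.2.1, x.2.1.2.1, x.1.2.2) := by
    simp [obter_diagonal, hb]
  show est_1_diagonal x y = est_1_diagonal_alt x y
  simp only [est_1_diagonal, est_1_diagonal_alt, List.foldl, h1, h2, Option.some.injEq]
  have e1 : (9 : Int) - 6 = 3 := by norm_num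
  have e2 : (1 : Int) + 6 = 7 := by norm_num
  rw [e1, e2, diag_step_eq y 0 1 5 9 _ hy, diag_step_eq y _ 7 5 3 _ hy]
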